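-- pv_equiv track=rewrite | github.com/deepin-community/kernel | debian/lib/python/debian_linux/gencontrol.py | __ruleid_deps
-- ===== SOURCE A (Python) =====
-- from typing import (
--     Any,
--     Iterable,
--     Iterator,
--     IO,
-- )
--
-- def __ruleid_deps(ruleid: tuple[str], name: str) -> Iterator[tuple[str, str]]:
--     """
--     Generate all the rules dependencies.
--     ```
--     build: build_a
--     build_a: build_a_b
--     build_a_b: build_a_b_image
--     ```
--     """
--     r = ruleid + (name, )
--     yield (
--         '',
--         '_' + '_'.join(r[:1]),
--     )
--     for i in range(1, len(r)):
--         yield (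
--             '_' + '_'.join(r[:i]),
--             '_' + '_'.join(r[:i + 1]),
--         )
-- ===== SOURCE B (Python) =====
-- def __ruleid_deps(ruleid, name):
--     # Build the full node list once with a running accumulator, then
--     # emit the edges as adjacent pairs of that list.
--     nodes = ['']
--     acc = ''
--     for part in (*ruleid, name):
--         acc = acc + ('_' + part)
--         nodes.append(acc)
--     yield from zip(nodes, nodes[1:])
-- ===== Notes on version B (the rewrite author's own statement) =====
-- stated objective: alternative
-- what changed: Replaces the direct prefix-join loop (which re-joins the prefix from scratch for every edge) by a single accumulator pass that builds the node-name table incrementally, followed by a pairwise zip over adjacent nodes.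
import Mathlib
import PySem

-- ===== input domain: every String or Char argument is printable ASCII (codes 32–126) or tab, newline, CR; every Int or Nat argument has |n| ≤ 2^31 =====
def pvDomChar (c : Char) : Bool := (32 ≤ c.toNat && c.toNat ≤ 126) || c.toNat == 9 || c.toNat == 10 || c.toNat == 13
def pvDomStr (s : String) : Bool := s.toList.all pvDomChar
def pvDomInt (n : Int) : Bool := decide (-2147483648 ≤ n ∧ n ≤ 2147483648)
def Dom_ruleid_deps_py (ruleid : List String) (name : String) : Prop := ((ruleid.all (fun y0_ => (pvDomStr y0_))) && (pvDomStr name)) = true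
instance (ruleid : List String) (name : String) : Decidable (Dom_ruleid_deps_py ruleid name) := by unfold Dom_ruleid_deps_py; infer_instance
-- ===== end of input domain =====

-- B builds the node-name table once with a running accumulator and zips adjacent
-- entries, instead of re-joining the whole prefix for every edge (alternative decomposition).

-- ===== PORT A =====
def ruleid_deps_py (ruleid : List String) (name : String) : List (String × String) :=
  let r := ruleid ++ [name]
  ("", "_" ++ PySem.Str.join "_" (PySem.List.slice r none (some 1))) ::
  (PySem.List.pyRange 1 (r.length : Int) 1).map (fun i =>
    ("_" ++ PySem.Str.join "_" (PySem.List.slice r none (some i)),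
     "_" ++ PySem.Str.join "_" (PySem.List.slice r none (some (i + 1)))))

-- ===== PORT B =====
def ruleid_deps_py_alt (ruleid : List String) (name : String) : List (String × String) :=
  let step : (String × List String) → String → (String × List String) :=
    fun st part =>
      let acc := st.1 ++ ("_" ++ part)
      (acc, st.2 ++ [acc])
  let nodes := ((ruleid ++ [name]).foldl step ("", [""])).2
  nodes.zip nodes.tail

-- ===== PRECONDITION & SPEC =====
def Spec_ruleid_deps_py (ruleid : List String) (name : String) (out : List (String × String)) : Prop := out = ruleid_deps_py_alt ruleid name
instance (ruleid : List String) (name : String) (out : List (String × String)) : Decidable (Spec_ruleid_deps_py ruleid name out) := by unfold Spec_ruleid_deps_py; infer_instance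

-- ===== CLAIM (what is proved, stated in full; the proofs are below) =====
def Claim_equal_ruleid_deps_py : Prop := ∀ (ruleid : List String) (name : String), Dom_ruleid_deps_py ruleid name → Spec_ruleid_deps_py ruleid name (ruleid_deps_py ruleid name)

-- ===== LEMMAS AND PROOFS =====

-- node name of a prefix; "" for the empty prefix
def pvNode (pre : List String) : String :=
  if pre = [] then "" else "_" ++ PySem.Str.join "_" pre

theorem chJoin_snoc (sep : List Char) (ys : List (List Char)) (y : List Char) (h : ys ≠ []) :
    PySem.Chars.join sep (ys ++ [y]) = PySem.Chars.join sep ys ++ sep ++ y := by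
  induction ys with
  | nil => simp at h
  | cons a as ih =>
    cases as with
    | nil => simp [PySem.Chars.join_cons_cons, PySem.Chars.join_singleton]
    | cons b bs =>
      have := ih (by simp)
      simp only [List.cons_append] at this ⊢
      rw [PySem.Chars.join_cons_cons, this, PySem.Chars.join_cons_cons]
      simp

theorem strJoin_snoc (xs : List String) (x : String) (h : xs ≠ []) :
    PySem.Str.join "_" (xs ++ [x]) = PySem.Str.join "_" xs ++ ("_" ++ x) := by
  apply String.toList_inj.mp
  simp only [PySem.Str.toList_join, List.map_append, List.map_cons, List.map_nil,
    String.toList_append]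
  rw [chJoin_snoc _ _ _ (by simpa using h)]
  simp

theorem pvNode_snoc (pre : List String) (p : String) :
    pvNode (pre ++ [p]) = pvNode pre ++ ("_" ++ p) := by
  cases pre with
  | nil =>
    apply String.toList_inj.mp
    simp [pvNode, PySem.Str.toList_join, PySem.Chars.join_singleton]
  | cons q pre' =>
    simp only [pvNode, List.cons_append, reduceCtorEq, if_false]
    rw [← List.cons_append, strJoin_snoc _ _ (by simp)]
    apply String.toList_inj.mp
    simp

-- the list of accumulator values produced by B's loop
def pvAccs : String → List String → List String
  | _, [] => []
  | a, p :: ps => (a ++ ("_" ++ p)) :: pvAccs (a ++ ("_" ++ p)) ps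

theorem pvFoldl_snd (r : List String) (a : String) (ns : List String) :
    (r.foldl (fun (st : String × List String) part =>
        (st.1 ++ ("_" ++ part), st.2 ++ [st.1 ++ ("_" ++ part)])) (a, ns)).2
      = ns ++ pvAccs a r := by
  induction r generalizing a ns with
  | nil => simp [pvAccs]
  | cons p ps ih => simp [pvAccs, ih]

theorem pvAccs_eq (r pre : List String) :
    pvAccs (pvNode pre) r
      = (List.range r.length).map (fun k => pvNode (pre ++ r.take (k + 1))) := by
  induction r generalizing pre with
  | nil => simp [pvAccs]
  | cons p ps ih =>
    have h1 : pvNode pre ++ ("_" ++ p) = pvNode (pre ++ [p]) := (pvNode_snoc pre p).symm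
    simp only [pvAccs, h1, ih (pre ++ [p]), List.length_cons, List.range_succ_eq_map,
      List.map_cons, List.map_map]
    refine congrArg₂ List.cons ?_ ?_
    · simp
    · apply List.map_congr_left
      intro k _
      simp [Function.comp, List.append_assoc]

theorem pvZip_consec {α : Type} (g : Nat → α) (n : Nat) :
    (((List.range (n + 1)).map g).zip (((List.range (n + 1)).map g).tail))
      = (List.range n).map (fun k => (g k, g (k + 1))) := by
  apply List.ext_getElem
  · simp [List.length_zip]
  · intro k h1 h2
    simp only [List.length_zip, List.length_map, List.length_range, List.length_tail] at h1
    have hk : k < n := by omega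
    simp [List.getElem_zip, List.getElem_tail]

-- ===== VERDICT (by name: the statement is the Claim_ definition above) =====
theorem pvNode_take_succ (r : List String) (hr : r ≠ []) (k : Nat) :
    pvNode (r.take (k + 1)) = "_" ++ PySem.Str.join "_" (r.take (k + 1)) := by
  have h : r.take (k + 1) ≠ [] := by
    simp [List.take_eq_nil_iff, hr]
  simp [pvNode, h]

theorem ruleid_deps_py_spec : Claim_equal_ruleid_deps_py := by
  intro ruleid name _
  unfold Spec_ruleid_deps_py ruleid_deps_py ruleid_deps_py_alt
  simp only []
  set r := ruleid ++ [name] with hr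
  have hrne : r ≠ [] := by simp [hr]
  set m := ruleid.length with hm
  have hlen : r.length = m + 1 := by simp [hr, hm]
  set g : Nat → String := fun k => pvNode (r.take k) with hg
  -- B side: the node list is the table of prefix nodes
  have hfold :
      ((r.foldl (fun (st : String × List String) part =>
          (st.1 ++ ("_" ++ part), st.2 ++ [st.1 ++ ("_" ++ part)])) ("", [""])).2)
        = [""] ++ pvAccs "" r := pvFoldl_snd r "" [""]
  have haccs : pvAccs "" r = (List.range r.length).map (fun k => pvNode (r.take (k + 1))) := by
    have h0 : ("" : String) = pvNode [] := by simp [pvNode]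
    rw [h0, pvAccs_eq]
    simp
  have hnodes :
      [""] ++ pvAccs "" r = (List.range (m + 1 + 1)).map g := by
    rw [haccs, hlen]
    rw [show (List.range (m + 1 + 1)).map g = g 0 :: (List.range (m + 1)).map (g ∘ Nat.succ) from
      by rw [List.range_succ_eq_map]; simp]
    refine congrArg₂ List.cons ?_ ?_
    · simp [hg, pvNode]
    · apply List.map_congr_left
      intro k _
      simp [hg, Function.comp]
  have hB :
      (([""] ++ pvAccs "" r).zip (([""] ++ pvAccs "" r).tail))
        = (List.range (m + 1)).map (fun k => (g k, g (k + 1))) := by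
    rw [hnodes, pvZip_consec]
  rw [hfold, hB]
  -- A side
  have htoNat : ∀ k : Nat, ((1 : Int) + (k : Int)).toNat = k + 1 := by intro k; omega
  rw [hlen, PySem.List.pyRange_one]
  have hcnt : ((((m + 1 : Nat) : Int)) - 1).toNat = m := by omega
  rw [hcnt, List.range_succ_eq_map, List.map_cons, List.map_map, List.map_map]
  refine congrArg₂ List.cons ?_ ?_
  · rw [PySem.List.slice_to r (by norm_num : (0:Int) ≤ 1)]
    refine Prod.ext ?_ ?_
    · simp [hg, pvNode]
    · simpa [hg] using (pvNode_take_succ r hrne 0).symm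
  · apply List.map_congr_left
    intro k _
    simp only [Function.comp]
    rw [PySem.List.slice_to r (by positivity : (0:Int) ≤ 1 + (k : Int)),
        PySem.List.slice_to r (by positivity : (0:Int) ≤ 1 + (k : Int) + 1),
        htoNat k]
    have h2 : ((1 : Int) + (k : Int) + 1).toNat = k + 2 := by omega
    rw [h2]
    refine Prod.ext ?_ ?_
    · simpa [hg] using (pvNode_take_succ r hrne k).symm
    · simpa [hg] using (pvNode_take_succ r hrne (k + 1)).symm
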